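-- pv_equiv track=rewrite | github.com/chanheeee-oh/ppp_2025 | hw10/hw10_4_2.py | get_rain_event_amounts
-- ===== SOURCE A (Python) =====
-- def get_rain_event_amounts(rainfalls):
--     events = []
--     current_event_total = 0
--     for rain in rainfalls:
--         if rain > 0:
--             current_event_total += rain
--         else:
--             if current_event_total > 0:
--                 events.append(current_event_total)
--                 current_event_total = 0
--     if current_event_total > 0:
--         events.append(current_event_total)
--     return events
-- ===== SOURCE B (Python) =====
-- def get_rain_event_amounts(rainfalls):
--     # Group-then-reduce: locate each maximal run of positive values and sum it.
--     events = []
--     i, n = 0, len(rainfalls)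
--     while i < n:
--         if rainfalls[i] > 0:
--             j = i
--             while j < n and rainfalls[j] > 0:
--                 j += 1
--             events.append(sum(rainfalls[i:j]))
--             i = j
--         else:
--             i += 1
--     return events
-- ===== Notes on version B (the rewrite author's own statement) =====
-- stated objective: alternative
-- what changed: A keeps a running event accumulator in one stateful pass with a final flush; B instead partitions the list into maximal positive runs (takeWhile/dropWhile-style span) and emits the sum of each run, with no carried accumulator or flush step.
import Mathlib
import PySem

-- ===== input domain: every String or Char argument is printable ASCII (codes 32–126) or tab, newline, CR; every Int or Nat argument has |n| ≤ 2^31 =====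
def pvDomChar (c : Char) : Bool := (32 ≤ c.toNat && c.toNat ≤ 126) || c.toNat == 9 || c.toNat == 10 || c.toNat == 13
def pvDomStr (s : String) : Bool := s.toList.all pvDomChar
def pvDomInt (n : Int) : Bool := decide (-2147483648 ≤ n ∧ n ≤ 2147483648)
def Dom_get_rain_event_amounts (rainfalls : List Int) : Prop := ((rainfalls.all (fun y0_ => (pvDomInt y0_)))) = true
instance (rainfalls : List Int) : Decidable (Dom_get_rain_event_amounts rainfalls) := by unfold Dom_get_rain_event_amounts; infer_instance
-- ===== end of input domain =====

-- B sums each maximal positive run found by a span (takeWhile/dropWhile), instead of A's stateful accumulator pass.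


-- ===== PORT A =====
def get_rain_event_amounts (rainfalls : List Int) : List Int :=
  let s := rainfalls.foldl
    (fun (st : List Int × Int) rain =>
      if rain > 0 then (st.1, st.2 + rain)
      else if st.2 > 0 then (st.1 ++ [st.2], 0) else st)
    ([], 0)
  if s.2 > 0 then s.1 ++ [s.2] else s.1

-- ===== PORT B =====
def get_rain_event_amounts_alt (rainfalls : List Int) : List Int :=
  match rainfalls with
  | [] => []
  | r :: rs =>
    if r > 0 then
      (r + (rs.takeWhile (fun x => 0 < x)).sum) :: get_rain_event_amounts_alt (rs.dropWhile (fun x => 0 < x))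
    else
      get_rain_event_amounts_alt rs
termination_by rainfalls.length
decreasing_by
  · exact Nat.lt_succ_of_le (List.length_dropWhile_le _ _)
  · simp

-- ===== PRECONDITION & SPEC =====
def Spec_get_rain_event_amounts (rainfalls : List Int) (out : List Int) : Prop := out = get_rain_event_amounts_alt rainfalls
instance (rainfalls : List Int) (out : List Int) : Decidable (Spec_get_rain_event_amounts rainfalls out) := by unfold Spec_get_rain_event_amounts; infer_instance

-- ===== CLAIM (what is proved, stated in full; the proofs are below) =====
def Claim_equal_get_rain_event_amounts : Prop := ∀ (rainfalls : List Int), Dom_get_rain_event_amounts rainfalls → Spec_get_rain_event_amounts rainfalls (get_rain_event_amounts rainfalls)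

-- ===== LEMMAS AND PROOFS =====

-- A's loop (plus final flush) written as a structural recursion on the remaining list.
def loopA (cur : Int) : List Int → List Int
  | [] => if cur > 0 then [cur] else []
  | r :: rs =>
    if r > 0 then loopA (cur + r) rs
    else if cur > 0 then cur :: loopA 0 rs else loopA cur rs

lemma foldl_eq_loopA (l : List Int) : ∀ (ev : List Int) (cur : Int),
    (let s := l.foldl
        (fun (st : List Int × Int) rain =>
          if rain > 0 then (st.1, st.2 + rain)
          else if st.2 > 0 then (st.1 ++ [st.2], 0) else st)
        (ev, cur)
     if s.2 > 0 then s.1 ++ [s.2] else s.1) = ev ++ loopA cur l := by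
  induction l with
  | nil => intro ev cur; simp [loopA]; split_ifs <;> simp
  | cons r rs ih =>
    intro ev cur
    simp only [List.foldl_cons, loopA]
    by_cases hr : r > 0
    · simpa [hr] using ih ev (cur + r)
    · by_cases hc : cur > 0
      · simpa [hr, hc] using ih (ev ++ [cur]) 0
      · simpa [hr, hc] using ih ev cur

lemma loopA_eq_alt (l : List Int) :
    loopA 0 l = get_rain_event_amounts_alt l ∧
    (∀ cur : Int, 0 < cur →
      loopA cur l = (cur + (l.takeWhile (fun x => 0 < x)).sum) ::
        get_rain_event_amounts_alt (l.dropWhile (fun x => 0 < x))) := by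
  induction l with
  | nil =>
    constructor
    · simp [loopA, get_rain_event_amounts_alt]
    · intro cur hc; simp [loopA, hc, get_rain_event_amounts_alt]
  | cons r rs ih =>
    by_cases hr : r > 0
    · constructor
      · simp only [loopA, if_pos hr, zero_add]
        rw [(ih.2 r hr)]
        simp [get_rain_event_amounts_alt, hr]
      · intro cur hc
        simp only [loopA, if_pos hr]
        rw [ih.2 (cur + r) (by omega)]
        simp [List.takeWhile, List.dropWhile, hr]
        ring
    · constructor
      · simp [loopA, hr, get_rain_event_amounts_alt, ih.1]
      · intro cur hc
        simp [loopA, hr, hc, get_rain_event_amounts_alt, ih.1,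
          List.takeWhile, List.dropWhile]

-- ===== VERDICT (by name: the statement is the Claim_ definition above) =====
theorem get_rain_event_amounts_spec : Claim_equal_get_rain_event_amounts := by
  intro l _
  show get_rain_event_amounts l = get_rain_event_amounts_alt l
  have h := foldl_eq_loopA l [] 0
  simp only [get_rain_event_amounts]
  rw [h, (loopA_eq_alt l).1]
  simp
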